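-- pv_equiv track=rewrite | github.com/AdityaGovardhan/semi-supervised-learning | task3.py | get_10_pos_docs
-- ===== SOURCE A (Python) =====
-- def get_10_pos_docs(labelled_y, categs_sorted_by_doc_num):
--     cat_docs = {}
--     # all_copy.deepcopy(labelled_y)
--     visited_docs = []
--     for categ in categs_sorted_by_doc_num:
--         for i, j in enumerate(labelled_y):
--             if((categ in j) and (i not in visited_docs)):
--                 if(categ in cat_docs):
--                     cat_docs[categ].append(i)
--                 else:
--                     cat_docs[categ] = [i]
--                 visited_docs.append(i)
--                 if(len(cat_docs.get(categ)) == 10):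
--                     break
--     return cat_docs
-- ===== SOURCE B (Python) =====
-- def get_10_pos_docs(labelled_y, categs_sorted_by_doc_num):
--     # Phase 1: inverted index — for each category, the doc indices containing it.
--     cat_to_docs = {}
--     for categ in categs_sorted_by_doc_num:
--         cat_to_docs[categ] = [i for i, j in enumerate(labelled_y) if categ in j]
--     # Phase 2: selection with a shared visited set, cap of 10 per category.
--     visited = set()
--     cat_docs = {}
--     for categ in categs_sorted_by_doc_num:
--         for i in cat_to_docs[categ]:
--             if i not in visited:
--                 cat_docs.setdefault(categ, []).append(i)
--                 visited.add(i)
--                 if len(cat_docs[categ]) == 10: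
--                     break
--     return cat_docs
-- ===== Notes on version B (the rewrite author's own statement) =====
-- stated objective: alternative
-- what changed: Replaced A's single nested scan (which rescans all of labelled_y for every category while filtering and selecting at once) with a two-phase plan: first build an inverted index mapping each category to its matching doc indices, then select up to 10 unvisited indices per category from that precomputed list with a shared visited set.
import Mathlib
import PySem

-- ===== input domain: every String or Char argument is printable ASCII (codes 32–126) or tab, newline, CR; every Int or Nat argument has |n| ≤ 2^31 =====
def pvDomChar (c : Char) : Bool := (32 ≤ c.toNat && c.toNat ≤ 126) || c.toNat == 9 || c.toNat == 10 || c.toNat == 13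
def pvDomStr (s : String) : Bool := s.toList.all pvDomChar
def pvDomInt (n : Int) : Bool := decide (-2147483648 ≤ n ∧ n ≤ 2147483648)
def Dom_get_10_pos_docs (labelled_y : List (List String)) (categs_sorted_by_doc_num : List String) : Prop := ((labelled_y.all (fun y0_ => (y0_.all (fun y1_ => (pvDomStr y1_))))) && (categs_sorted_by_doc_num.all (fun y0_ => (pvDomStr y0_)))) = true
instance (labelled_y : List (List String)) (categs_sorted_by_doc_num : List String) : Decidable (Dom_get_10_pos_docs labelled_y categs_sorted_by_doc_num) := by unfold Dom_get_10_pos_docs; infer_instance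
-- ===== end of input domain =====

-- B replaces A's repeated full rescans of labelled_y by a two-phase plan: build a per-category
-- inverted index once, then select up to 10 unvisited indices per category from that index
-- (objective: alternative decomposition; same exact results).


-- ===== PORT A =====
-- A's inner loop: for i, j in enumerate(labelled_y): … with break; state = (cat_docs, visited_docs)
def pvAInner (categ : String) :
    List (Int × List String) → PySem.Dict String (List Int) → List Int →
    PySem.Dict String (List Int) × List Int
  | [], cd, vis => (cd, vis)
  | (i, j) :: rest, cd, vis =>
    if j.contains categ && !(vis.contains i) then
      let cd' := if cd.contains categ then cd.modify categ [] (fun l => l ++ [i])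
                 else cd.insert categ [i]
      let vis' := vis ++ [i]
      if (cd'.getD categ []).length == 10 then (cd', vis')
      else pvAInner categ rest cd' vis'
    else pvAInner categ rest cd vis

def get_10_pos_docs (labelled_y : List (List String)) (categs_sorted_by_doc_num : List String) :
    List (String × List Int) :=
  (categs_sorted_by_doc_num.foldl
      (fun st categ => pvAInner categ (PySem.List.enumerate labelled_y) st.1 st.2)
      (PySem.Dict.empty, [])).1.items

-- ===== PORT B =====
-- phase 1: cat_to_docs[categ] = [i for i, j in enumerate(labelled_y) if categ in j]
def pvBIndex (labelled_y : List (List String)) (categ : String) : List Int :=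
  ((PySem.List.enumerate labelled_y).filter (fun p => p.2.contains categ)).map (fun p => p.1)

def pvBPhase1 (labelled_y : List (List String)) (categs : List String) :
    PySem.Dict String (List Int) :=
  categs.foldl (fun d categ => d.insert categ (pvBIndex labelled_y categ)) PySem.Dict.empty

-- phase 2 inner loop: for i in cat_to_docs[categ]: … with break; visited is a Python set
def pvBInner (categ : String) :
    List Int → PySem.Dict String (List Int) → PySem.Set Int →
    PySem.Dict String (List Int) × PySem.Set Int
  | [], cd, vis => (cd, vis)
  | i :: rest, cd, vis =>
    if !(vis.contains i) then
      let cd' := cd.modify categ [] (fun l => l ++ [i])   -- setdefault(categ, []).append(i)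
      let vis' := vis.add i
      if (cd'.getD categ []).length == 10 then (cd', vis')
      else pvBInner categ rest cd' vis'
    else pvBInner categ rest cd vis

def get_10_pos_docs_alt (labelled_y : List (List String)) (categs_sorted_by_doc_num : List String) :
    List (String × List Int) :=
  let idx := pvBPhase1 labelled_y categs_sorted_by_doc_num
  -- idx.getD categ [] : cat_to_docs[categ]; the key is always present (inserted in phase 1)
  (categs_sorted_by_doc_num.foldl
      (fun st categ => pvBInner categ (idx.getD categ []) st.1 st.2)
      (PySem.Dict.empty, PySem.Set.empty)).1.items

-- ===== PRECONDITION & SPEC =====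
def Spec_get_10_pos_docs (labelled_y : List (List String)) (categs_sorted_by_doc_num : List String) (out : List (String × List Int)) : Prop := out = get_10_pos_docs_alt labelled_y categs_sorted_by_doc_num
instance (labelled_y : List (List String)) (categs_sorted_by_doc_num : List String) (out : List (String × List Int)) : Decidable (Spec_get_10_pos_docs labelled_y categs_sorted_by_doc_num out) := by unfold Spec_get_10_pos_docs; infer_instance

-- ===== CLAIM (what is proved, stated in full; the proofs are below) =====
def Claim_equal_get_10_pos_docs : Prop := ∀ (labelled_y : List (List String)) (categs_sorted_by_doc_num : List String), Dom_get_10_pos_docs labelled_y categs_sorted_by_doc_num → Spec_get_10_pos_docs labelled_y categs_sorted_by_doc_num (get_10_pos_docs labelled_y categs_sorted_by_doc_num)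

-- ===== LEMMAS AND PROOFS =====

-- A's two-way dict update equals B's unconditional setdefault-style modify.
theorem pv_dict_update_eq (cd : PySem.Dict String (List Int)) (categ : String) (i : Int) :
    (if cd.contains categ = true then cd.modify categ [] (fun l => l ++ [i])
     else cd.insert categ [i]) = cd.modify categ [] (fun l => l ++ [i]) := by
  by_cases h : cd.contains categ = true
  · simp [h]
  · simp only [Bool.not_eq_true] at h
    simp only [h, Bool.false_eq_true, if_false, PySem.Dict.modify,
      PySem.Dict.getD_of_not_contains cd ([] : List Int) h, List.nil_append]

-- The inner loops agree: A filters while scanning, B scans the pre-filtered index list.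
theorem pv_inner_eq (categ : String) (ps : List (Int × List String))
    (cd : PySem.Dict String (List Int)) (vis : List Int) :
    pvAInner categ ps cd vis =
      pvBInner categ ((ps.filter (fun p => p.2.contains categ)).map (fun p => p.1)) cd vis := by
  induction ps generalizing cd vis with
  | nil => rfl
  | cons p rest ih =>
    obtain ⟨i, j⟩ := p
    rw [List.filter_cons]
    by_cases hj : categ ∈ j
    · rw [if_pos (by simpa using hj), List.map_cons]
      by_cases hv : i ∈ vis
      · have h1 : pvAInner categ ((i, j) :: rest) cd vis = pvAInner categ rest cd vis := by
          simp [pvAInner, hv]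
        have h2 : pvBInner categ (i :: (rest.filter (fun p => p.2.contains categ)).map (fun p => p.1)) cd vis
            = pvBInner categ ((rest.filter (fun p => p.2.contains categ)).map (fun p => p.1)) cd vis := by
          simp [pvBInner, PySem.Set.contains, hv]
        rw [h1, h2, ih]
      · have hvc : List.contains vis i = false := by simpa using hv
        have hjc : List.contains j categ = true := by simpa using hj
        have hadd : PySem.Set.add vis i = vis ++ [i] := by
          simp [PySem.Set.add, PySem.Set.contains, hv]
        simp only [pvAInner, pvBInner, pv_dict_update_eq, PySem.Set.contains, hadd,
          hvc, hjc, Bool.not_false, Bool.and_self, if_true]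
        split <;> simp [ih]
    · have h1 : pvAInner categ ((i, j) :: rest) cd vis = pvAInner categ rest cd vis := by
        simp [pvAInner, hj]
      rw [if_neg (by simpa using hj), h1, ih]

-- Inserts of other keys do not change a lookup.
theorem pv_getD_foldl_insert_not_mem (labelled_y : List (List String)) (l : List String)
    (d : PySem.Dict String (List Int)) (c : String) (h : c ∉ l) :
    (l.foldl (fun d categ => d.insert categ (pvBIndex labelled_y categ)) d).getD c []
      = d.getD c [] := by
  induction l generalizing d with
  | nil => rfl
  | cons b rs ih =>
    simp only [List.foldl_cons]
    have hne : c ≠ b := fun he => h (by simp [he])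
    rw [ih _ (fun hm => h (List.mem_cons_of_mem _ hm)),
      PySem.Dict.getD_insert_of_ne d _ _ hne]

-- Looking up a key of the phase-1 index dict yields its comprehension.
theorem pv_phase1_getD (labelled_y : List (List String)) (categs : List String)
    (d : PySem.Dict String (List Int)) (c : String) (hc : c ∈ categs) :
    (categs.foldl (fun d categ => d.insert categ (pvBIndex labelled_y categ)) d).getD c []
      = pvBIndex labelled_y c := by
  induction categs generalizing d with
  | nil => cases hc
  | cons a rest ih =>
    simp only [List.foldl_cons]
    by_cases hmem : c ∈ rest
    · exact ih _ hmem
    · have hca : c = a := by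
        rcases List.mem_cons.mp hc with h | h
        · exact h
        · exact absurd h hmem
      subst hca
      rw [pv_getD_foldl_insert_not_mem labelled_y rest _ c hmem,
        PySem.Dict.getD_insert_self]

-- ===== VERDICT (by name: the statement is the Claim_ definition above) =====
theorem get_10_pos_docs_spec : Claim_equal_get_10_pos_docs := by
  intro labelled_y categs _
  unfold Spec_get_10_pos_docs get_10_pos_docs get_10_pos_docs_alt
  have hfold :
      categs.foldl
          (fun st categ => pvAInner categ (PySem.List.enumerate labelled_y) st.1 st.2)
          (PySem.Dict.empty, ([] : List Int))
        = categs.foldl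
          (fun st categ => pvBInner categ ((pvBPhase1 labelled_y categs).getD categ []) st.1 st.2)
          (PySem.Dict.empty, PySem.Set.empty) := by
    refine PySem.List.foldl_congr_mem categs _ _ _ (fun acc c hc => ?_)
    rw [pv_inner_eq]
    simp only [pvBPhase1]
    rw [pv_phase1_getD labelled_y categs PySem.Dict.empty c hc]
    rfl
  rw [hfold]
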